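-- pv_equiv track=rewrite | github.com/XanderJC/mphil-thesis | soft_tree_model.py | select_params
-- ===== SOURCE A (Python) =====
-- def select_params(path,tree_params):
--
--     l = len(path)
--     idx = 2**(l-1)
--
--     path_p = path[1:]
--     path_p.reverse()
--
--     binar = [(2**i)*v for i,v in enumerate(path_p)]
--     idx += sum(binar)
--     idx -= 1
--     return tree_params[idx]
-- ===== SOURCE B (Python) =====
-- def select_params(path, tree_params):
--     acc = 0
--     for v in path[1:]:
--         acc = acc * 2 + v
--     base = 2 ** (len(path) - 1) - 1
--     return tree_params[base + acc]
-- ===== Notes on version B (the rewrite author's own statement) =====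
-- stated objective: simpler
-- what changed: Replaces the reverse + enumerate + powers-of-two list + sum with a single forward Horner accumulator loop over path[1:] and a separate closed-form offset.
import Mathlib
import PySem

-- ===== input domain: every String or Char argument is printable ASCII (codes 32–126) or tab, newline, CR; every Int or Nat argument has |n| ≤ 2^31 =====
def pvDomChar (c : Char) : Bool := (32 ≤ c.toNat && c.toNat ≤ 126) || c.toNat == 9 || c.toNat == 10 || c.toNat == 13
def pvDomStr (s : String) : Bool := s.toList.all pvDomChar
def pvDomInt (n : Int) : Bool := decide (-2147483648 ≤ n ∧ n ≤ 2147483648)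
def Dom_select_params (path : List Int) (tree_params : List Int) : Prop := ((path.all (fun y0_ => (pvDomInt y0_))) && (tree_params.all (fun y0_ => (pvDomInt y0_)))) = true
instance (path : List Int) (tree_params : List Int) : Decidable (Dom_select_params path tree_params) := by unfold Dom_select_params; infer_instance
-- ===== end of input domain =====

-- B replaces A's reverse + enumerate-with-powers list + sum by one forward Horner pass plus a closed-form offset (objective: simpler).

-- ===== PORT A =====
def select_params (path : List Int) (tree_params : List Int) : Int :=
  let l := path.length
  let idx : Int := 2 ^ (l - 1)         -- exact for l ≥ 1 (Pre_ excludes the empty path, where Python's 2**(-1) is a float and indexing raises)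
  let path_p := (PySem.List.slice path (some 1) none).reverse
  let binar := (PySem.List.enumerate path_p 0).map (fun iv => (2 : Int) ^ iv.1.toNat * iv.2)  -- enumerate indices are ≥ 0, so ^toNat is exact
  let idx := idx + binar.sum - 1
  PySem.List.pyGetD tree_params idx 0  -- exact under Pre_ (index in range)

-- ===== PORT B =====
def select_params_alt (path : List Int) (tree_params : List Int) : Int :=
  let acc := (PySem.List.slice path (some 1) none).foldl (fun a v => a * 2 + v) 0
  let base : Int := 2 ^ (path.length - 1) - 1
  PySem.List.pyGetD tree_params (base + acc) 0  -- exact under Pre_ (index in range)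

-- ===== PRECONDITION & SPEC =====
-- Pre_ excludes the empty path (Python A raises TypeError on float indexing 2**(-1)-... ) and
-- out-of-range final indices (Python A raises IndexError); on both, B raises identically.
def Pre_select_params (path : List Int) (tree_params : List Int) : Prop :=
  path ≠ [] ∧
  PySem.Raise.InRange tree_params.length
    (2 ^ (path.length - 1) - 1 + (path.drop 1).foldl (fun a v => a * 2 + v) 0)
instance (path : List Int) (tree_params : List Int) : Decidable (Pre_select_params path tree_params) := by unfold Pre_select_params; infer_instance
def pvWitness_select_params : List Int × List Int := ([0, 1], [5, 4, 3, 2])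
def Spec_select_params (path : List Int) (tree_params : List Int) (out : Int) : Prop := out = select_params_alt path tree_params
instance (path : List Int) (tree_params : List Int) (out : Int) : Decidable (Spec_select_params path tree_params out) := by unfold Spec_select_params; infer_instance

-- ===== CLAIM (what is proved, stated in full; the proofs are below) =====
def Claim_equal_select_params : Prop := ∀ (path : List Int) (tree_params : List Int), Dom_select_params path tree_params → Pre_select_params path tree_params → Spec_select_params path tree_params (select_params path tree_params)

-- ===== LEMMAS AND PROOFS =====

-- weighted sum A builds from a (reversed) list
def pvWSum (xs : List Int) : Int :=
  ((PySem.List.enumerate xs 0).map (fun iv => (2 : Int) ^ iv.1.toNat * iv.2)).sum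

theorem pvWSum_append_singleton (xs : List Int) (v : Int) :
    pvWSum (xs ++ [v]) = pvWSum xs + 2 ^ xs.length * v := by
  unfold pvWSum
  rw [PySem.List.enumerate_append]
  simp [PySem.List.enumerate_cons, PySem.List.enumerate_nil]

theorem horner_eq_wsum (l : List Int) (init : Int) :
    l.foldl (fun a v => a * 2 + v) init = init * 2 ^ l.length + pvWSum l.reverse := by
  induction l generalizing init with
  | nil => simp [pvWSum, PySem.List.enumerate_nil]
  | cons v t ih =>
    rw [List.foldl_cons, ih, List.reverse_cons, pvWSum_append_singleton]
    simp [List.length_reverse, pow_succ]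
    ring

-- ===== VERDICT (by name: the statement is the Claim_ definition above) =====
theorem select_params_spec : Claim_equal_select_params := by
  intro path tree_params _ _
  unfold Spec_select_params select_params select_params_alt
  rw [horner_eq_wsum]
  unfold pvWSum
  ring_nf
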